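-- pv_equiv track=rewrite | github.com/pilyeooong/algorithm | implementation/time.py | solution
-- ===== SOURCE A (Python) =====
-- def solution(n):
--     t = ""
--     count = 0
--     for h in range(n + 1):
--         for m in range(60):
--             for s in range(60):
--                 t = f"{h}{m}{s}"
--                 if "3" in t:
--                     count += 1
--
--     return count
-- ===== SOURCE B (Python) =====
-- def solution(n):
--     count = 0
--     for h in range(n + 1):
--         count += 3600 if '3' in str(h) else 1575
--     return count
-- ===== Notes on version B (the rewrite author's own statement) =====
-- stated objective: faster
-- what changed: Replaces the 3600-iteration inner minute/second scan per hour with per-hour arithmetic: an hour whose digits contain '3' contributes 3600, otherwise 1575 (= 3600 - 45*45 minute/second pairs lacking a 3).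
import Mathlib
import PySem

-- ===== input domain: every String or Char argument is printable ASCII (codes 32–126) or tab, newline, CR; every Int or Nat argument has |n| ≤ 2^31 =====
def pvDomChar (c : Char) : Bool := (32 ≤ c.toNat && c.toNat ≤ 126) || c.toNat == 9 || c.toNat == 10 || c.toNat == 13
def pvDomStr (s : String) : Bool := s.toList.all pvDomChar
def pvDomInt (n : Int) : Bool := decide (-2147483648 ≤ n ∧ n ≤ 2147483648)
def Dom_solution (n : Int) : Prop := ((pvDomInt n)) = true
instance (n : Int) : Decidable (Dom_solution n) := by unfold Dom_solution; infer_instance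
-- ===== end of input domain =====

-- B replaces A's 3600-iteration minute/second scan per hour with per-hour arithmetic
-- (3600 if the hour's digits contain '3', else 1575), a constant-factor speed-up.

-- ===== PORT A =====
-- strings ported through List Char (PySem.Chars), as PySem prescribes; f"{h}{m}{s}" is digit-list concatenation
def solution (n : Int) : Int :=
  (PySem.List.pyRange 0 (n + 1) 1).foldl (fun count h =>
    (PySem.List.pyRange 0 60 1).foldl (fun count m =>
      (PySem.List.pyRange 0 60 1).foldl (fun count s =>
        let t := PySem.Int.toChars h ++ PySem.Int.toChars m ++ PySem.Int.toChars s
        if PySem.Chars.isIn ['3'] t then count + 1 else count) count) count) 0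

-- ===== PORT B =====
def solution_alt (n : Int) : Int :=
  (PySem.List.pyRange 0 (n + 1) 1).foldl (fun count h =>
    count + (if PySem.Chars.isIn ['3'] (PySem.Int.toChars h) then 3600 else 1575)) 0

-- ===== PRECONDITION & SPEC =====
def Spec_solution (n : Int) (out : Int) : Prop := out = solution_alt n
instance (n : Int) (out : Int) : Decidable (Spec_solution n out) := by unfold Spec_solution; infer_instance

-- ===== CLAIM (what is proved, stated in full; the proofs are below) =====
def Claim_equal_solution : Prop := ∀ (n : Int), Dom_solution n → Spec_solution n (solution n)

-- ===== LEMMAS AND PROOFS =====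

theorem singleton_infix_iff (c : Char) (l : List Char) : [c] <:+: l ↔ c ∈ l := by
  constructor
  · intro h
    exact h.subset (List.mem_singleton_self c)
  · intro h
    obtain ⟨s, t, rfl⟩ := List.append_of_mem h
    exact ⟨s, t, by simp⟩

theorem isIn_singleton (c : Char) (l : List Char) :
    PySem.Chars.isIn [c] l = decide (c ∈ l) := by
  by_cases h : c ∈ l
  · simp only [h, decide_true]
    rw [PySem.Chars.isIn_iff_infix, singleton_infix_iff]
    exact h
  · simp only [h, decide_false]
    rw [PySem.Chars.isIn_eq_false_iff, singleton_infix_iff]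
    exact h

-- A's inner 60×60 scan for one hour h equals B's per-hour per-hour summand
theorem inner_eq (h c : Int) :
    (PySem.List.pyRange 0 60 1).foldl (fun count m =>
      (PySem.List.pyRange 0 60 1).foldl (fun count s =>
        let t := PySem.Int.toChars h ++ PySem.Int.toChars m ++ PySem.Int.toChars s
        if PySem.Chars.isIn ['3'] t then count + 1 else count) count) c
    = c + (if PySem.Chars.isIn ['3'] (PySem.Int.toChars h) then 3600 else 1575) := by
  simp only [isIn_singleton, List.mem_append]
  by_cases hh : ('3' : Char) ∈ PySem.Int.toChars h
  · simp only [hh, decide_true, true_or, if_true]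
    simp only [PySem.List.foldl_add]
    congr 1
  · simp only [hh, decide_false, false_or, Bool.false_eq_true, if_false]
    simp only [PySem.List.foldl_if_add_one, PySem.List.foldl_add]
    congr 1

theorem solution_eq_alt (n : Int) : solution n = solution_alt n := by
  unfold solution solution_alt
  congr 1
  funext c h
  exact inner_eq h c

-- ===== VERDICT (by name: the statement is the Claim_ definition above) =====
theorem solution_spec : Claim_equal_solution := by
  intro n _
  unfold Spec_solution
  exact solution_eq_alt n
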